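-- pv_equiv track=rewrite | github.com/lly11-01/aoc-23 | day13.py | is_full_reflection
-- ===== SOURCE A (Python) =====
-- def is_full_reflection(matrix, row_num):
--     i, j = row_num-1, row_num+2
--     try:
--         while True:
--             assert 0 <= i < j < len(matrix)
--             if matrix[i] != matrix[j]:
--                 return False
--             i -= 1
--             j += 1
--     except (AssertionError, IndexError):
--         return True
-- ===== SOURCE B (Python) =====
-- def is_full_reflection(matrix, row_num):
--     overlap = min(row_num, len(matrix) - row_num - 2)
--     if overlap <= 0:
--         return True
--     return matrix[row_num - overlap:row_num][::-1] == matrix[row_num + 2:row_num + 2 + overlap]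
-- ===== Notes on version B (the rewrite author's own statement) =====
-- stated objective: simpler
-- what changed: Replaced A's outward-expanding two-pointer while-loop terminated by a caught assertion with a closed-form overlap computation and a single slice comparison (reversed top block vs bottom block).
import Mathlib
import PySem

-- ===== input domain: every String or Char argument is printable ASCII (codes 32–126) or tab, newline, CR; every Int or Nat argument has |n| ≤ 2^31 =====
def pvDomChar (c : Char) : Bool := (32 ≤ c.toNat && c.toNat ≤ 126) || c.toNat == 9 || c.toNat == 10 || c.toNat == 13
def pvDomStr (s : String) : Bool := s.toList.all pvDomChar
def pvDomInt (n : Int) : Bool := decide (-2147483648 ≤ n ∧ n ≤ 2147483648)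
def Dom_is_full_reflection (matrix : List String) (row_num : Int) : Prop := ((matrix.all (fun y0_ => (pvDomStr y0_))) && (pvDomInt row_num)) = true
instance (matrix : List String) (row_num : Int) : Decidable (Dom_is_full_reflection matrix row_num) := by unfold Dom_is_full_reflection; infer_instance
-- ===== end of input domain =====

-- ===== PORT A =====
-- B replaces A's outward two-pointer loop by one slice comparison; simpler, same cost.
-- isfrLoop is the literal while-loop of A: assert 0 <= i < j < len(matrix), compare, expand.
def isfrLoop (matrix : List String) (i j : Int) : Bool :=
  if h : 0 ≤ i ∧ i < j ∧ j < (matrix.length : Int) then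
    if PySem.List.pyGetD matrix i "" ≠ PySem.List.pyGetD matrix j "" then false
    else isfrLoop matrix (i - 1) (j + 1)
  else true
termination_by ((matrix.length : Int) - j).toNat
decreasing_by omega

def is_full_reflection (matrix : List String) (row_num : Int) : Bool :=
  isfrLoop matrix (row_num - 1) (row_num + 2)

-- ===== PORT B =====
def is_full_reflection_alt (matrix : List String) (row_num : Int) : Bool :=
  let overlap := min row_num ((matrix.length : Int) - row_num - 2)
  if overlap ≤ 0 then true
  else decide ((PySem.List.slice matrix (some (row_num - overlap)) (some row_num)).reverse
      = PySem.List.slice matrix (some (row_num + 2)) (some (row_num + 2 + overlap)))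

-- ===== PRECONDITION & SPEC =====
def Spec_is_full_reflection (matrix : List String) (row_num : Int) (out : Bool) : Prop := out = is_full_reflection_alt matrix row_num
instance (matrix : List String) (row_num : Int) (out : Bool) : Decidable (Spec_is_full_reflection matrix row_num out) := by unfold Spec_is_full_reflection; infer_instance

-- ===== CLAIM (what is proved, stated in full; the proofs are below) =====
def Claim_equal_is_full_reflection : Prop := ∀ (matrix : List String) (row_num : Int), Dom_is_full_reflection matrix row_num → Spec_is_full_reflection matrix row_num (is_full_reflection matrix row_num)

-- ===== LEMMAS AND PROOFS =====



-- loop characterization: isfrLoop at (i,j) compares the reversed k-block before i+1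
-- with the k-block starting at j, where k clamps min(i+1, len-j) at 0.
lemma isfrLoop_eq (matrix : List String) (k : Nat) :
    ∀ (i j : Int), i < j → (k : Int) = max (min (i + 1) ((matrix.length : Int) - j)) 0 →
      isfrLoop matrix i j
        = decide ((((matrix.drop (i + 1 - k).toNat).take k).reverse : List String)
            = (matrix.drop j.toNat).take k) := by
  induction k with
  | zero =>
      intro i j hij hk
      rw [isfrLoop]
      have hguard : ¬ (0 ≤ i ∧ i < j ∧ j < (matrix.length : Int)) := by omega
      simp [hguard]
  | succ k ih =>
      intro i j hij hk
      have hL : j < (matrix.length : Int) := by omega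
      have hi0 : 0 ≤ i := by omega
      have hik : (k : Int) ≤ i := by omega
      have hjk : j + (k + 1 : Int) ≤ (matrix.length : Int) := by omega
      rw [isfrLoop]
      have hguard : 0 ≤ i ∧ i < j ∧ j < (matrix.length : Int) := ⟨hi0, hij, hL⟩
      rw [dif_pos hguard]
      have hpL : i.toNat < matrix.length := by omega
      have hqL : j.toNat < matrix.length := by omega
      have hgi : PySem.List.pyGetD matrix i "" = matrix[i.toNat] :=
        PySem.List.pyGetD_eq_getElem matrix "" hi0 (by omega)
      have hgj : PySem.List.pyGetD matrix j "" = matrix[j.toNat] :=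
        PySem.List.pyGetD_eq_getElem matrix "" (by omega) (by omega)
      -- decompose the right-hand slices
      have htopIdx : (i + 1 - (k + 1 : Nat)).toNat = i.toNat - k := by push_cast; omega
      have htop : (matrix.drop (i + 1 - (k + 1 : Nat)).toNat).take (k + 1)
          = (matrix.drop (i.toNat - k)).take k ++ [matrix[i.toNat]] := by
        rw [htopIdx, List.take_add_one]
        have hik2 : i.toNat - k + k = i.toNat := by omega
        rw [List.getElem?_drop, hik2, List.getElem?_eq_getElem hpL]
        rfl
      have hbot : (matrix.drop j.toNat).take (k + 1)
          = matrix[j.toNat] :: (matrix.drop (j.toNat + 1)).take k := by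
        rw [List.drop_eq_getElem_cons hqL, List.take_succ_cons]
      rw [htop, hbot, List.reverse_append, List.reverse_singleton, List.singleton_append]
      by_cases heq : matrix[i.toNat] = matrix[j.toNat]
      · rw [hgi, hgj, if_neg (by simp [heq])]
        have ihs := ih (i - 1) (j + 1) (by omega) (by omega)
        rw [ihs]
        have h1 : (i - 1 + 1 - (k : Nat)).toNat = i.toNat - k := by omega
        have h2 : (j + 1).toNat = j.toNat + 1 := by omega
        rw [h1, h2]
        simp [heq]
      · rw [hgi, hgj, if_pos (by simp [heq])]
        simp [heq]

theorem is_full_reflection_spec : Claim_equal_is_full_reflection := by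
  intro matrix row_num _
  unfold Spec_is_full_reflection is_full_reflection is_full_reflection_alt
  set L : Int := (matrix.length : Int) with hLdef
  by_cases hov : min row_num (L - row_num - 2) ≤ 0
  · -- overlap ≤ 0: A's guard fails immediately, B returns true
    rw [isfrLoop]
    have hguard : ¬ (0 ≤ row_num - 1 ∧ row_num - 1 < row_num + 2 ∧ row_num + 2 < L) := by omega
    rw [dif_neg hguard]
    simp [hov]
  · rw [if_neg hov]
    set ov : Int := min row_num (L - row_num - 2) with hov_def
    have hov1 : 1 ≤ ov := by omega
    have hknat : ((ov.toNat : Int)) = ov := by omega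
    have hmain := isfrLoop_eq matrix ov.toNat (row_num - 1) (row_num + 2)
      (by omega) (by rw [hLdef] at *; omega)
    rw [hmain]
    have hr0 : 0 ≤ row_num - ov := by omega
    have hs1 : PySem.List.slice matrix (some (row_num - ov)) (some row_num)
        = (matrix.drop (row_num - ov).toNat).take (row_num.toNat - (row_num - ov).toNat) :=
      PySem.List.slice_toNat matrix hr0 (by omega)
    have hs2 : PySem.List.slice matrix (some (row_num + 2)) (some (row_num + 2 + ov))
        = (matrix.drop (row_num + 2).toNat).take ((row_num + 2 + ov).toNat - (row_num + 2).toNat) :=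
      PySem.List.slice_toNat matrix (by omega) (by omega)
    rw [hs1, hs2]
    have e1 : (row_num - 1 + 1 - (ov.toNat : Int)).toNat = (row_num - ov).toNat := by omega
    have e2 : row_num.toNat - (row_num - ov).toNat = ov.toNat := by omega
    have e3 : (row_num + 2 + ov).toNat - (row_num + 2).toNat = ov.toNat := by omega
    rw [e1, e2, e3]
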